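-- pv_equiv track=rewrite | github.com/y2cl/collectibles_manager | backend/migrations/csv_to_sqlite.py | parse_profile_from_filename
-- ===== SOURCE A (Python) =====
-- def parse_profile_from_filename(owner_id: str, filename: str) -> str:
--     """
--     Derive profile_id from filenames like:
--       john-vintage-mtg_collection.csv  → "vintage"
--       john-mtg_collection.csv          → "default"
--     """
--     stem = filename.replace("_collection.csv", "").replace("_watchlist.csv", "")
--     prefix = f"{owner_id}-"
--     if stem.startswith(prefix):
--         remainder = stem[len(prefix):]
--         # remainder could be "mtg", "pokemon", "baseball", or "{profile}-mtg", etc.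
--         game_slugs = ["mtg", "pokemon", "baseball", "unified"]
--         for gs in game_slugs:
--             if remainder == gs:
--                 return "default"
--             if remainder.endswith(f"-{gs}"):
--                 return remainder[: -(len(gs) + 1)]
--     return "default"
-- ===== SOURCE B (Python) =====
-- GAME_SLUGS = {"mtg", "pokemon", "baseball", "unified"}
--
--
-- def parse_profile_from_filename(owner_id: str, filename: str) -> str:
--     stem = filename.replace("_collection.csv", "").replace("_watchlist.csv", "")
--     prefix = f"{owner_id}-"
--     if not stem.startswith(prefix):
--         return "default"
--     parts = stem[len(prefix):].rsplit("-", 1)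
--     if len(parts) == 2 and parts[1] in GAME_SLUGS:
--         return parts[0]
--     return "default"
-- ===== Notes on version B (the rewrite author's own statement) =====
-- stated objective: idiomatic
-- what changed: Replaces the loop over four game slugs with repeated endswith/equality tests and per-slug negative slicing by a single rsplit('-', 1) of the remainder followed by one membership test of the trailing token in the slug set.
import Mathlib
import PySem

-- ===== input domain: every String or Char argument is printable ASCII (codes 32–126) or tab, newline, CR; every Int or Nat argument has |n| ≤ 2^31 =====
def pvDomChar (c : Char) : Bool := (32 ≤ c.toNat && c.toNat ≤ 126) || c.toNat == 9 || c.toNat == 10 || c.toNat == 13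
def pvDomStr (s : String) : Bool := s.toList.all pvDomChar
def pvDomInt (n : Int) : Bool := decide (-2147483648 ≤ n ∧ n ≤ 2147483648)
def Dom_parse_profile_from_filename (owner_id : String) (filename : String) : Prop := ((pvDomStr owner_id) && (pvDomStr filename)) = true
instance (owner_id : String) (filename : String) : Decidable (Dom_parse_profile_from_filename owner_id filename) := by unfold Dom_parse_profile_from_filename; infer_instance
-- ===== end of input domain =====

-- B replaces A's loop over the four game slugs (equality + endswith test per slug)
-- by one rsplit('-', 1) of the remainder and a single membership test (idiomatic; same cost).

-- ===== PORT A =====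
-- A's for-loop over the slug list with its two early returns, as structural recursion.
def pvSlugLoop (remainder : String) : List String → String
  | [] => "default"
  | gs :: rest =>
    if remainder = gs then "default"
    else if PySem.Str.endswith remainder ("-" ++ gs) then
      PySem.Str.slice remainder none (some (-(PySem.Str.len gs + 1)))
    else pvSlugLoop remainder rest

def parse_profile_from_filename (owner_id : String) (filename : String) : String :=
  let stem := PySem.Str.replace (PySem.Str.replace filename "_collection.csv" "") "_watchlist.csv" ""
  let pfx := owner_id ++ "-"
  if PySem.Str.startswith stem pfx then
    pvSlugLoop (PySem.Str.slice stem (some (PySem.Str.len pfx)) none)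
      ["mtg", "pokemon", "baseball", "unified"]
  else "default"

-- ===== PORT B =====
-- hand port of s.rsplit('-', 1), exact for a single-char separator: the input is the
-- REVERSED character list; returns none when the separator is absent (Python: [s]),
-- some (last-piece reversed, first-piece reversed) otherwise (Python: [first, last]).
def pvRevSplitFirst (sep : Char) : List Char → Option (List Char × List Char)
  | [] => none
  | c :: rest =>
    if c = sep then some ([], rest)
    else match pvRevSplitFirst sep rest with
      | none => none
      | some (a, b) => some (c :: a, b)

def pvGameSlugs : PySem.Set String := PySem.Set.ofList ["mtg", "pokemon", "baseball", "unified"]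

def parse_profile_from_filename_alt (owner_id : String) (filename : String) : String :=
  let stem := PySem.Str.replace (PySem.Str.replace filename "_collection.csv" "") "_watchlist.csv" ""
  let pfx := owner_id ++ "-"
  if PySem.Str.startswith stem pfx then
    let remainder := PySem.Str.slice stem (some (PySem.Str.len pfx)) none
    match pvRevSplitFirst '-' remainder.toList.reverse with
    | none => "default"
    | some (last, init) =>
      if PySem.Set.contains pvGameSlugs (String.ofList last.reverse) then String.ofList init.reverse
      else "default"
  else "default"

-- ===== PRECONDITION & SPEC =====
def Spec_parse_profile_from_filename (owner_id : String) (filename : String) (out : String) : Prop := out = parse_profile_from_filename_alt owner_id filename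
instance (owner_id : String) (filename : String) (out : String) : Decidable (Spec_parse_profile_from_filename owner_id filename out) := by unfold Spec_parse_profile_from_filename; infer_instance

-- ===== CLAIM (what is proved, stated in full; the proofs are below) =====
def Claim_equal_parse_profile_from_filename : Prop := ∀ (owner_id : String) (filename : String), Dom_parse_profile_from_filename owner_id filename → Spec_parse_profile_from_filename owner_id filename (parse_profile_from_filename owner_id filename)

-- ===== LEMMAS AND PROOFS =====

theorem pvRevSplitFirst_eq_none_iff (sep : Char) (l : List Char) :
    pvRevSplitFirst sep l = none ↔ sep ∉ l := by
  induction l with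
  | nil => simp [pvRevSplitFirst]
  | cons c rest ih =>
    by_cases hc : c = sep
    · simp [pvRevSplitFirst, hc]
    · have hcs : ¬ sep = c := fun he => hc he.symm
      cases h : pvRevSplitFirst sep rest with
      | none => simp [pvRevSplitFirst, hc, h, hcs, ih.mp h]
      | some p =>
        have h2 : sep ∈ rest := by
          by_contra hn
          rw [ih.mpr hn] at h
          simp at h
        simp [pvRevSplitFirst, hc, h, h2]

theorem pvRevSplitFirst_some (sep : Char) (l a b : List Char)
    (h : pvRevSplitFirst sep l = some (a, b)) : l = a ++ sep :: b ∧ sep ∉ a := by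
  induction l generalizing a with
  | nil => simp [pvRevSplitFirst] at h
  | cons c rest ih =>
    simp only [pvRevSplitFirst] at h
    by_cases hc : c = sep
    · simp [hc] at h
      obtain ⟨ha, hb⟩ := h
      subst hc; subst ha; subst hb
      simp
    · have hcs : ¬ sep = c := fun he => hc he.symm
      simp only [hc, if_false] at h
      cases hr : pvRevSplitFirst sep rest with
      | none => simp [hr] at h
      | some p =>
        simp [hr] at h
        obtain ⟨ha, hb⟩ := h
        obtain ⟨h1, h2⟩ := ih p.1 (by simp [hr, ← hb])
        subst ha
        simp [h1, hcs, h2]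

theorem pvRevSplitFirst_append (sep : Char) (a b : List Char) (ha : sep ∉ a) :
    pvRevSplitFirst sep (a ++ sep :: b) = some (a, b) := by
  induction a with
  | nil => simp [pvRevSplitFirst]
  | cons c rest ih =>
    simp only [List.mem_cons, not_or] at ha
    have hc : ¬ c = sep := fun he => ha.1 he.symm
    simp [pvRevSplitFirst, hc, ih ha.2]

theorem pv_endswith_iff_rsf (cs g : List Char) (hg : '-' ∉ g) :
    PySem.Chars.endswith cs ('-' :: g) = true ↔
      ∃ b, pvRevSplitFirst '-' cs.reverse = some (g.reverse, b) := by
  rw [PySem.Chars.endswith_iff]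
  constructor
  · rintro ⟨t, ht⟩
    refine ⟨t.reverse, ?_⟩
    have : cs.reverse = g.reverse ++ '-' :: t.reverse := by
      rw [← ht]; simp
    rw [this]
    exact pvRevSplitFirst_append _ _ _ (by simpa using hg)
  · rintro ⟨b, hb⟩
    obtain ⟨h1, _⟩ := pvRevSplitFirst_some _ _ _ _ hb
    refine ⟨b.reverse, ?_⟩
    have := congrArg List.reverse h1
    simpa using this.symm

theorem pv_slice_of_rsf (cs a b : List Char)
    (h : pvRevSplitFirst '-' cs.reverse = some (a, b)) :
    PySem.List.slice cs none (some (-((a.length : Int) + 1))) = b.reverse := by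
  obtain ⟨h1, _⟩ := pvRevSplitFirst_some _ _ _ _ h
  have hcs : cs = b.reverse ++ '-' :: a.reverse := by
    have := congrArg List.reverse h1
    simpa using this
  have hk : -((a.length : Int) + 1) = -(((a.length + 1 : Nat)) : Int) := by push_cast; ring
  rw [hk, PySem.List.slice_to_neg_natCast cs (a.length + 1) (by omega), hcs]
  have hlen : (b.reverse ++ '-' :: a.reverse).length - (a.length + 1) = b.reverse.length := by
    simp
  rw [hlen, List.take_left]

-- A's loop over any dash-free slug list equals B's rsplit-then-lookup decision.
theorem pv_loop_eq (r : String) (slugs : List String)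
    (hs : ∀ gs ∈ slugs, '-' ∉ gs.toList) :
    pvSlugLoop r slugs =
      match pvRevSplitFirst '-' r.toList.reverse with
      | none => "default"
      | some (last, init) =>
        if PySem.Set.contains slugs (String.ofList last.reverse) then String.ofList init.reverse
        else "default" := by
  induction slugs with
  | nil =>
    cases h : pvRevSplitFirst '-' r.toList.reverse with
    | none => simp [pvSlugLoop]
    | some p => simp [pvSlugLoop, PySem.Set.contains]
  | cons gs rest ih =>
    have hgs : '-' ∉ gs.toList := hs gs (by simp)
    have hrest : ∀ g ∈ rest, '-' ∉ g.toList := fun g hg => hs g (by simp [hg])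
    have hend : PySem.Str.endswith r ("-" ++ gs) =
        PySem.Chars.endswith r.toList ('-' :: gs.toList) := by
      rw [PySem.Str.endswith_eq, String.toList_append]
      rfl
    cases h : pvRevSplitFirst '-' r.toList.reverse with
    | none =>
      have hnod : '-' ∉ r.toList := by
        have := (pvRevSplitFirst_eq_none_iff '-' r.toList.reverse).mp h
        simpa using this
      have hef : PySem.Chars.endswith r.toList ('-' :: gs.toList) = false := by
        by_contra hc
        have : PySem.Chars.endswith r.toList ('-' :: gs.toList) = true := by
          simpa using hc
        obtain ⟨b, hb⟩ := (pv_endswith_iff_rsf _ _ hgs).mp this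
        simp [h] at hb
      simp only [pvSlugLoop, hend, hef, if_false, Bool.false_eq_true]
      rw [ih hrest, h]
      split <;> rfl
    | some p =>
      obtain ⟨last, init⟩ := p
      have hmem : '-' ∈ r.toList := by
        obtain ⟨h1, _⟩ := pvRevSplitFirst_some _ _ _ _ h
        have : '-' ∈ r.toList.reverse := by rw [h1]; simp
        simpa using this
      have hne : r ≠ gs := by
        intro he; rw [he] at hmem; exact hgs hmem
      by_cases hcase : gs.toList = last.reverse
      · have het : PySem.Chars.endswith r.toList ('-' :: gs.toList) = true := by
          rw [pv_endswith_iff_rsf _ _ hgs]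
          exact ⟨init, by rw [h, hcase]; simp⟩
        have hslice : PySem.Str.slice r none (some (-(PySem.Str.len gs + 1))) =
            String.ofList init.reverse := by
          rw [← String.toList_inj, PySem.Str.toList_slice, PySem.Chars.slice_eq_listSlice,
            PySem.Str.len_eq]
          have hlg : (gs.toList.length : Int) = (last.length : Int) := by
            rw [hcase]; simp
          rw [hlg, pv_slice_of_rsf r.toList last init h]
          simp
        have hcont : PySem.Set.contains (gs :: rest) (String.ofList last.reverse) = true := by
          have : gs = String.ofList last.reverse := by
            rw [← String.toList_inj]; simpa using hcase
          simp [PySem.Set.contains, ← this]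
        simp only [pvSlugLoop, hend, het, if_true, hne, if_false, hcont, hslice]
      · have hef : PySem.Chars.endswith r.toList ('-' :: gs.toList) = false := by
          by_contra hc
          have : PySem.Chars.endswith r.toList ('-' :: gs.toList) = true := by
            simpa using hc
          obtain ⟨b, hb⟩ := (pv_endswith_iff_rsf _ _ hgs).mp this
          rw [h] at hb
          have hba : last = gs.toList.reverse ∧ init = b := by simpa using hb
          exact hcase (by rw [hba.1]; simp)
        have hgsne : gs ≠ String.ofList last.reverse := by
          intro he
          exact hcase (by rw [he]; simp)
        simp only [pvSlugLoop, hend, hef, if_false, hne, Bool.false_eq_true]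
        rw [ih hrest, h]
        simp [Ne.symm hgsne]

theorem pvGameSlugs_eq : pvGameSlugs = ["mtg", "pokemon", "baseball", "unified"] := by rfl

theorem pv_slugs_nodash :
    ∀ gs ∈ (["mtg", "pokemon", "baseball", "unified"] : List String), '-' ∉ gs.toList := by
  decide

-- ===== VERDICT (by name: the statement is the Claim_ definition above) =====
theorem parse_profile_from_filename_spec : Claim_equal_parse_profile_from_filename := by
  intro owner_id filename _
  unfold Spec_parse_profile_from_filename parse_profile_from_filename parse_profile_from_filename_alt
  dsimp only
  by_cases hsw : PySem.Str.startswith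
      (PySem.Str.replace (PySem.Str.replace filename "_collection.csv" "") "_watchlist.csv" "")
      (owner_id ++ "-") = true
  · rw [if_pos hsw, if_pos hsw, pv_loop_eq _ _ pv_slugs_nodash, pvGameSlugs_eq]
  · rw [if_neg hsw, if_neg hsw]
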